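-- pv_equiv track=rewrite | github.com/MachidelPino/tecnicas-de-diseno-de-algoritmos | Guias/practica_1_divide_conquer_resuelta.py | izquierda_dominante
-- ===== SOURCE A (Python) =====
-- def izquierda_dominante(arr):
--     long = len(arr)
--     if long <= 1:
--         return True
--     elif long == 2:
--         return arr[0] > arr[1]
--     else:
--         medio = long // 2                       # Divide
--         sumai = sum(arr[:medio])                # Conquer O(n/2)
--         sumad = sum(arr[medio:])                # Conquer O(n/2)
--         izq = izquierda_dominante(arr[:medio])  # Conquer
--         der = izquierda_dominante(arr[medio:])  # Conquer
--
--         return sumai > sumad and izq and der    # Combine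
-- ===== SOURCE B (Python) =====
-- def izquierda_dominante(arr):
--     # Prefix sums + index-based recursion: each split checks its sums in O(1),
--     # no slice copying; O(n) total instead of A's O(n log n).
--     pref = [0]
--     s = 0
--     for x in arr:
--         s += x
--         pref.append(s)
--
--     def check(lo, hi):
--         L = hi - lo
--         if L <= 1:
--             return True
--         if L == 2:
--             return arr[lo] > arr[lo + 1]
--         m = lo + L // 2
--         return (pref[m] - pref[lo] > pref[hi] - pref[m]
--                 and check(lo, m) and check(m, hi))
--
--     return check(0, len(arr))
-- ===== Notes on version B (the rewrite author's own statement) =====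
-- stated objective: faster
-- what changed: replaces slice-copying recursion with repeated sum() by one prefix-sum array and an index-based recursion, so every split's two sums are O(1) lookups and no sublists are materialized
import Mathlib
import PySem

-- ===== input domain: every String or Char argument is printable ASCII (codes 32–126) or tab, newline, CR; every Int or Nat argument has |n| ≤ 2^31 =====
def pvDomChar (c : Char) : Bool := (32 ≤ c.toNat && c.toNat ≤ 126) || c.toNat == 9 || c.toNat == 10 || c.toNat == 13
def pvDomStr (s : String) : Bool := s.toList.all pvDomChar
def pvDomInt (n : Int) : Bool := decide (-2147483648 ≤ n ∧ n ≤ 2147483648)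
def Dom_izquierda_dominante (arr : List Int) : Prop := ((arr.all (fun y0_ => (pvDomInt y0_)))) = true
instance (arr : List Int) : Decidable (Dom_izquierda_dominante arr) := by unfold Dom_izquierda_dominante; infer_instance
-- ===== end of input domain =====

-- B replaces A's slice-copying recursion (sum() on both halves at every level) by one
-- prefix-sum array and an index-based recursion over (lo,hi); same return value everywhere.

-- ===== PORT A =====
-- literal transliteration of A: slices via PySem.List.slice, sum() = List.sum;
-- arr[0]/arr[1] are taken under the branch condition length = 2, so getD is exact there.
def izquierda_dominante (arr : List Int) : Bool :=
  let long := arr.length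
  if long ≤ 1 then true
  else if long = 2 then decide (arr.getD 0 0 > arr.getD 1 0)
  else
    let medio := long / 2
    let sumai := (PySem.List.slice arr none (some (medio : Int))).sum
    let sumad := (PySem.List.slice arr (some (medio : Int)) none).sum
    let izq := izquierda_dominante (PySem.List.slice arr none (some (medio : Int)))
    let der := izquierda_dominante (PySem.List.slice arr (some (medio : Int)) none)
    decide (sumai > sumad) && izq && der
termination_by arr.length
decreasing_by
  · simp only [PySem.List.slice_to_natCast, List.length_take]; omega
  · simp only [PySem.List.slice_from_natCast, List.length_drop]; omega

-- ===== PORT B =====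
-- the inner 'check(lo, hi)' of Source B; indices are Nat (all indices are ≥ 0 in B)
def pvCheck (arr pref : List Int) (lo hi : Nat) : Bool :=
  let L := hi - lo
  if L ≤ 1 then true
  else if L = 2 then decide (PySem.List.pyGetD arr (lo : Int) 0 > PySem.List.pyGetD arr ((lo : Int) + 1) 0)
  else
    let m := lo + L / 2
    decide (PySem.List.pyGetD pref (m : Int) 0 - PySem.List.pyGetD pref (lo : Int) 0 >
            PySem.List.pyGetD pref (hi : Int) 0 - PySem.List.pyGetD pref (m : Int) 0)
      && pvCheck arr pref lo m && pvCheck arr pref m hi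
termination_by hi - lo
decreasing_by all_goals omega

def izquierda_dominante_alt (arr : List Int) : Bool :=
  let pref := (arr.foldl (fun sp x => (sp.1 + x, sp.2 ++ [sp.1 + x])) ((0 : Int), ([0] : List Int))).2
  pvCheck arr pref 0 arr.length

-- ===== PRECONDITION & SPEC =====
def Spec_izquierda_dominante (arr : List Int) (out : Bool) : Prop := out = izquierda_dominante_alt arr
instance (arr : List Int) (out : Bool) : Decidable (Spec_izquierda_dominante arr out) := by unfold Spec_izquierda_dominante; infer_instance

-- ===== CLAIM (what is proved, stated in full; the proofs are below) =====
def Claim_equal_izquierda_dominante : Prop := ∀ (arr : List Int), Dom_izquierda_dominante arr → Spec_izquierda_dominante arr (izquierda_dominante arr)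

-- ===== LEMMAS AND PROOFS =====

-- structural prefix-sum list (Mathlib's List.scanl is monadic and awkward to unfold)
def pvScan : Int → List Int → List Int
  | s, [] => [s]
  | s, x :: xs => s :: pvScan (s + x) xs

-- B's prefix-building loop produces exactly List.scanl (+) 0 arr
theorem pvFold_snd (l : List Int) : ∀ (s : Int) (p : List Int),
    (l.foldl (fun sp x => (sp.1 + x, sp.2 ++ [sp.1 + x])) (s, p)).2
      = p ++ (pvScan s l).tail := by
  induction l with
  | nil => intro s p; simp [pvScan]
  | cons x xs ih =>
      intro s p
      have h : pvScan (s + x) xs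
          = (s + x) :: (pvScan (s + x) xs).tail := by
        cases xs <;> simp [pvScan]
      simp only [List.foldl_cons, ih, pvScan, List.tail_cons]
      rw [h]
      simp

theorem pvPref_eq (arr : List Int) :
    (arr.foldl (fun sp x => (sp.1 + x, sp.2 ++ [sp.1 + x])) ((0 : Int), ([0] : List Int))).2
      = pvScan 0 arr := by
  rw [pvFold_snd]
  cases arr <;> simp [pvScan]

theorem pvScanl_getD (l : List Int) : ∀ (s : Int) (i : Nat), i ≤ l.length →
    (pvScan s l).getD i 0 = s + (l.take i).sum := by
  induction l with
  | nil =>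
      intro s i h
      have : i = 0 := by simpa using h
      subst this; simp [pvScan]
  | cons x xs ih =>
      intro s i h
      cases i with
      | zero => simp [pvScan]
      | succ j =>
          simp only [pvScan, List.getD_cons_succ, List.take_succ_cons, List.sum_cons]
          rw [ih (s + x) j (by simpa using h)]
          ring

-- segment sum via two prefix-sum lookups
theorem pvSeg_sum (arr : List Int) (lo hi : Nat) (h1 : lo ≤ hi) (h2 : hi ≤ arr.length) :
    (pvScan 0 arr).getD hi 0 - (pvScan 0 arr).getD lo 0
      = ((arr.drop lo).take (hi - lo)).sum := by
  rw [pvScanl_getD arr 0 hi h2, pvScanl_getD arr 0 lo (le_trans h1 h2)]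
  have : arr.take hi = arr.take lo ++ (arr.drop lo).take (hi - lo) := by
    rw [← List.take_add]
    congr 1
    omega
  rw [this]
  simp

-- main correspondence: pvCheck on indices (lo, lo+L) = A on the segment arr[lo : lo+L]
theorem pvMain (arr : List Int) : ∀ (L lo : Nat), lo + L ≤ arr.length →
    pvCheck arr (pvScan 0 arr) lo (lo + L)
      = izquierda_dominante ((arr.drop lo).take L) := by
  intro L
  induction L using Nat.strong_induction_on with
  | _ L ih =>
    intro lo hle
    have hlseg : ((arr.drop lo).take L).length = L := by
      simp [List.length_take, List.length_drop]; omega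
    rw [pvCheck, izquierda_dominante]
    simp only [hlseg, Nat.add_sub_cancel_left]
    by_cases h1 : L ≤ 1
    · simp [h1]
    · by_cases h2 : L = 2
      · subst h2
        norm_num
        rw [show ((lo : Int) + 1) = ((lo + 1 : Nat) : Int) by push_cast; ring,
            PySem.List.pyGetD_natCast, List.getD_eq_getElem?_getD]
      · simp only [h1, h2, if_false]
        have hL3 : 3 ≤ L := by omega
        -- the two halves of the segment, as segments of arr
        have htake : ((arr.drop lo).take L).take (L / 2) = (arr.drop lo).take (L / 2) := by
          rw [List.take_take]; congr 1; omega
        have hdrop : ((arr.drop lo).take L).drop (L / 2)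
            = (arr.drop (lo + L / 2)).take (L - L / 2) := by
          rw [List.drop_take, List.drop_drop]
        rw [PySem.List.slice_to_natCast, PySem.List.slice_from_natCast, htake, hdrop]
        -- sums via prefix lookups
        have hs1 := pvSeg_sum arr lo (lo + L / 2) (by omega) (by omega)
        have hs2 := pvSeg_sum arr (lo + L / 2) (lo + L) (by omega) (by omega)
        simp only [Nat.add_sub_cancel_left] at hs1
        have hd2 : lo + L - (lo + L / 2) = L - L / 2 := by omega
        rw [hd2] at hs2
        -- recursive calls via strong IH
        have hr1 := ih (L / 2) (by omega) lo (by omega)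
        have hr2 := ih (L - L / 2) (by omega) (lo + L / 2) (by omega)
        have hsum2 : lo + L / 2 + (L - L / 2) = lo + L := by omega
        rw [hsum2] at hr2
        simp only [PySem.List.pyGetD_natCast] at *
        rw [hs1, hs2, hr1, hr2]

theorem pvAlt_eq_A (arr : List Int) : izquierda_dominante_alt arr = izquierda_dominante arr := by
  rw [izquierda_dominante_alt]
  simp only [pvPref_eq]
  have := pvMain arr arr.length 0 (by omega)
  simpa using this

-- ===== VERDICT (by name: the statement is the Claim_ definition above) =====
theorem izquierda_dominante_spec : Claim_equal_izquierda_dominante := by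
  intro arr _
  unfold Spec_izquierda_dominante
  exact (pvAlt_eq_A arr).symm
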